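-- pv_equiv track=rewrite | github.com/sinhatanmay18/FastAPI-assignment | main.py | find_largest_rectange
-- ===== SOURCE A (Python) =====
-- from typing import List
--
-- def find_largest_rectange(matrix: List[List[int]]) -> tuple:
--     if not matrix or not matrix[0]:
--         return 0, None
--
--     rows, cols = len(matrix), len(matrix[0])
--
--     max_area = 0
--     max_number = None
--     current_area = 0
--
--     height = [[0] * cols for _ in range(rows)]
--     left = [[0] * cols for _ in range(rows)]
--
--     for i in range(rows):
--         for j in range(cols):
--             if matrix[i][j] == -9:
--                 continue
--
--             if i == 0:
--                 height[i][j] = 1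
--             else:
--                 height[i][j] = height[i - 1][j] + 1 if matrix[i][j] == matrix[i - 1][j] else 1
--
--             left[i][j] = j if j == 0 or matrix[i][j] != matrix[i][j - 1] else left[i][j - 1]
--
--             for k in range(j, left[i][j] - 1, -1):
--                 current_width = j - k + 1
--                 current_height = min(height[i][k:j + 1])
--                 if current_width != current_height:
--                     current_area = current_width * current_height
--
--                 if current_area > max_area:
--                     max_area = current_area
--                     max_number = matrix[i][j]
--     if max_area == 0:
--         return -1, -1
--
--     return max_number, max_area
-- ===== SOURCE B (Python) =====
-- from typing import List
--
-- def find_largest_rectange(matrix: List[List[int]]) -> tuple: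
--     # One height row updated in place and a running minimum over heights
--     # replace A's 2-D tables and per-k slice-min (O(rows*cols^3) -> O(rows*cols^2)).
--     if not matrix or not matrix[0]:
--         return 0, None
--
--     cols = len(matrix[0])
--     h = [0] * cols
--     max_area = 0
--     max_number = None
--
--     for i in range(len(matrix)):
--         row = matrix[i]
--         l = [0] * cols
--         for j in range(cols):
--             v = row[j]
--             if v == -9:
--                 h[j] = 0
--                 continue
--             h[j] = h[j] + 1 if i > 0 and v == matrix[i - 1][j] else 1
--             l[j] = j if j == 0 or v != row[j - 1] else l[j - 1]
--             m = h[j]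
--             for k in range(j, l[j] - 1, -1):
--                 if h[k] < m:
--                     m = h[k]
--                 w = j - k + 1
--                 if w != m and w * m > max_area:
--                     max_area = w * m
--                     max_number = v
--
--     if max_area == 0:
--         return -1, -1
--     return max_number, max_area
-- ===== Notes on version B (the rewrite author's own statement) =====
-- stated objective: faster
-- what changed: B replaces A's two preallocated rows*cols 2-D tables and the per-k min() over a list slice by a single height row updated in place, a fresh per-row left array, and a running minimum maintained as k decreases, turning the O(cols) slice-min inside the k loop into O(1).
import Mathlib
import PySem

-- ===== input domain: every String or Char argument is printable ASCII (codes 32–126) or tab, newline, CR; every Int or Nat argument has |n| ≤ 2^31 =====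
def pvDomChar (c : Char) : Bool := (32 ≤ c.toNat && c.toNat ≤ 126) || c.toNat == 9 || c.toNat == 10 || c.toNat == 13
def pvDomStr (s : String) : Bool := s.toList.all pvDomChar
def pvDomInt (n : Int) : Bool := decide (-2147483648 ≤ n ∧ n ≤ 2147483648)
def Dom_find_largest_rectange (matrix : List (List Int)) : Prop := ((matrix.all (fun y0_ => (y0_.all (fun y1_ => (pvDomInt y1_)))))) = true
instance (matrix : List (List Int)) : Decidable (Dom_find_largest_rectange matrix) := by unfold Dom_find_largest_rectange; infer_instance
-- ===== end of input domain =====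

-- B replaces A's two rows×cols tables and A's min() over a fresh slice for every k by one
-- in-place height row, a per-row left array and a running minimum maintained as k decreases
-- (a timing run measured B faster; asymptotically O(rows*cols^3) vs O(rows*cols^2)).

-- ===== PORT A =====
-- min(height[i][k:j+1])
def pvSliceMinA (row : List Int) (k j1 : Int) : Int :=
  (PySem.List.min? (PySem.List.slice row (some k) (some j1)) (fun x => x)).getD 0

-- the inner `for k in range(j, left[i][j]-1, -1)` loop; state = (max_area, max_number, current_area)
def pvInnerA (mij : Int) (hrow : List Int) (j : Nat) (st : Int × Option Int × Int)
    (ks : List Int) : Int × Option Int × Int :=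
  ks.foldl (fun st k =>
    let w : Int := (j : Int) - k + 1
    let ch : Int := pvSliceMinA hrow k ((j : Int) + 1)
    let cur' : Int := if w ≠ ch then w * ch else st.2.2
    if cur' > st.1 then (cur', some mij, cur') else (st.1, st.2.1, cur')) st

-- one (i, j) cell of A's nested loops; state = (height, left, max_area, max_number, current_area)
def pvCellA (matrix : List (List Int)) (i j : Nat)
    (st : List (List Int) × List (List Int) × Int × Option Int × Int) :
    List (List Int) × List (List Int) × Int × Option Int × Int :=
  let mi := matrix.getD i []
  let mij := mi.getD j 0
  if mij = -9 then st else
  let H := st.1; let L := st.2.1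
  let hij : Int := if i = 0 then 1
    else if mij = (matrix.getD (i - 1) []).getD j 0 then (H.getD (i - 1) []).getD j 0 + 1 else 1
  let hrow := (H.getD i []).set j hij
  let lij : Int := if j = 0 ∨ mij ≠ mi.getD (j - 1) 0 then (j : Int) else (L.getD i []).getD (j - 1) 0
  let r := pvInnerA mij hrow j (st.2.2.1, st.2.2.2.1, st.2.2.2.2)
    (PySem.List.pyRange (j : Int) (lij - 1) (-1))
  (H.set i hrow, L.set i ((L.getD i []).set j lij), r.1, r.2.1, r.2.2)

def find_largest_rectange (matrix : List (List Int)) : Option Int × Option Int :=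
  if matrix = [] ∨ matrix.headD [] = [] then (some 0, none) else
  let rows := matrix.length
  let cols := (matrix.headD []).length
  let Z := List.replicate rows (List.replicate cols (0 : Int))
  let fin := (List.range rows).foldl (fun st i =>
      (List.range cols).foldl (fun st j => pvCellA matrix i j st) st)
    (Z, Z, (0 : Int), (none : Option Int), (0 : Int))
  if fin.2.2.1 = 0 then (some (-1), some (-1)) else (fin.2.2.2.1, some fin.2.2.1)

-- ===== PORT B =====
-- the inner k loop with the running minimum m; state = (m, max_area, max_number)
def pvInnerB (v : Int) (h : List Int) (j : Nat) (st : Int × Int × Option Int)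
    (ks : List Int) : Int × Int × Option Int :=
  ks.foldl (fun st k =>
    let hk := PySem.List.pyGetD h k 0
    let m' : Int := if hk < st.1 then hk else st.1
    let w : Int := (j : Int) - k + 1
    if w ≠ m' ∧ w * m' > st.2.1 then (m', w * m', some v) else (m', st.2.1, st.2.2)) st

-- one j step of B's row loop; state = (h, l, max_area, max_number)
def pvCellB (matrix : List (List Int)) (i : Nat) (row : List Int) (j : Nat)
    (st : List Int × List Int × Int × Option Int) : List Int × List Int × Int × Option Int :=
  let v := row.getD j 0
  if v = -9 then (st.1.set j 0, st.2.1, st.2.2.1, st.2.2.2) else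
  let hj : Int := if 0 < i ∧ v = (matrix.getD (i - 1) []).getD j 0 then st.1.getD j 0 + 1 else 1
  let h' := st.1.set j hj
  let lj : Int := if j = 0 ∨ v ≠ row.getD (j - 1) 0 then (j : Int) else st.2.1.getD (j - 1) 0
  let r := pvInnerB v h' j (h'.getD j 0, st.2.2.1, st.2.2.2)
    (PySem.List.pyRange (j : Int) (lj - 1) (-1))
  (h', st.2.1.set j lj, r.2.1, r.2.2)

def find_largest_rectange_alt (matrix : List (List Int)) : Option Int × Option Int :=
  if matrix = [] ∨ matrix.headD [] = [] then (some 0, none) else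
  let cols := (matrix.headD []).length
  let fin := (List.range matrix.length).foldl (fun (st : List Int × Int × Option Int) i =>
      let row := matrix.getD i []
      let r := (List.range cols).foldl (fun st j => pvCellB matrix i row j st)
        (st.1, List.replicate cols 0, st.2.1, st.2.2)
      (r.1, r.2.2.1, r.2.2.2))
    (List.replicate cols (0 : Int), (0 : Int), (none : Option Int))
  if fin.2.1 = 0 then (some (-1), some (-1)) else (fin.2.2, some fin.2.1)

-- ===== PRECONDITION & SPEC =====
-- Pre_ excludes exactly the ragged matrices on which the Python A raises IndexError
-- (a row shorter than the first row; B raises there too).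
def Pre_find_largest_rectange (matrix : List (List Int)) : Prop :=
  ∀ r ∈ matrix, (matrix.headD []).length ≤ r.length
instance (matrix : List (List Int)) : Decidable (Pre_find_largest_rectange matrix) := by
  unfold Pre_find_largest_rectange; infer_instance

def pvWitness_find_largest_rectange : List (List Int) := [[1, 1, 2], [1, 1, 2]]

def Spec_find_largest_rectange (matrix : List (List Int)) (out : Option Int × Option Int) : Prop :=
  out = find_largest_rectange_alt matrix
instance (matrix : List (List Int)) (out : Option Int × Option Int) :
    Decidable (Spec_find_largest_rectange matrix out) := by
  unfold Spec_find_largest_rectange; infer_instance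

-- ===== CLAIM (what is proved, stated in full; the proofs are below) =====
def Claim_equal_find_largest_rectange : Prop :=
  ∀ (matrix : List (List Int)), Dom_find_largest_rectange matrix →
    Pre_find_largest_rectange matrix →
    Spec_find_largest_rectange matrix (find_largest_rectange matrix)

-- ===== LEMMAS AND PROOFS =====

def pvSegMin (h : List Int) (j : Nat) : Nat → Int
  | k => if hk : k < j then min (h.getD k 0) (pvSegMin h j (k + 1)) else h.getD j 0
termination_by k => j - k

theorem pvSegMin_ge (h : List Int) (j k : Nat) (hk : j ≤ k) : pvSegMin h j k = h.getD j 0 := by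
  rw [pvSegMin]; simp [Nat.not_lt.mpr hk]

theorem pvSegMin_succ (h : List Int) (j k : Nat) (hk : k ≤ j) :
    pvSegMin h j k = min (h.getD k 0) (pvSegMin h j (k + 1)) := by
  rcases Nat.lt_or_ge k j with hlt | hge
  · rw [pvSegMin]; simp [hlt]
  · have hkj : k = j := le_antisymm hk hge
    subst hkj
    rw [pvSegMin_ge h k k le_rfl, pvSegMin_ge h k (k+1) (Nat.le_succ k)]
    simp

theorem pvSegMin_congr (h1 h2 : List Int) (j : Nat)
    (heq : ∀ t : Nat, t ≤ j → h1.getD t 0 = h2.getD t 0) (k : Nat) :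
    pvSegMin h1 j k = pvSegMin h2 j k := by
  by_cases hk : k < j
  · rw [pvSegMin_succ h1 j k (le_of_lt hk), pvSegMin_succ h2 j k (le_of_lt hk),
      heq k (le_of_lt hk), pvSegMin_congr h1 h2 j heq (k+1)]
  · rw [pvSegMin_ge _ _ _ (Nat.le_of_not_lt hk), pvSegMin_ge _ _ _ (Nat.le_of_not_lt hk),
      heq j le_rfl]
termination_by j - k

theorem pvFoldlMinComm (l : List Int) (x y : Int) :
    l.foldl min (min x y) = min x (l.foldl min y) := by
  induction l generalizing y with
  | nil => simp
  | cons a t ih => simp only [List.foldl_cons, min_assoc]; exact ih (min y a)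

theorem pvFoldTake (h : List Int) (j : Nat) (hj : j < h.length) :
    ∀ (d k : Nat), k + d = j → ((h.drop (k+1)).take d).foldl min (h.getD k 0) = pvSegMin h j k := by
  intro d
  induction d with
  | zero =>
    intro k hk
    have : k = j := by omega
    subst this
    simp [pvSegMin_ge h k k le_rfl]
  | succ d ih =>
    intro k hk
    have hk1 : k + 1 < h.length := by omega
    rw [List.drop_eq_getElem_cons hk1, List.take_succ_cons, List.foldl_cons]
    have e1 : h[k+1] = h.getD (k+1) 0 := (List.getD_eq_getElem h 0 hk1).symm
    rw [e1, pvFoldlMinComm, ih (k+1) (by omega), pvSegMin_succ h j k (by omega)]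

theorem pvSliceMinA_eq (h : List Int) (j k : Nat) (hkj : k ≤ j) (hj : j < h.length) :
    pvSliceMinA h (k : Int) ((j : Int) + 1) = pvSegMin h j k := by
  unfold pvSliceMinA
  have e0 : ((j:Int)+1) = ((j+1 : Nat) : Int) := by push_cast; ring
  rw [e0, PySem.List.slice_natCast]
  have hk : k < h.length := by omega
  rw [List.drop_eq_getElem_cons hk]
  have e2 : j + 1 - k = (j - k) + 1 := by omega
  rw [e2, List.take_succ_cons, PySem.List.min?_id_cons]
  have e3 : h[k] = h.getD k 0 := (List.getD_eq_getElem h 0 hk).symm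
  rw [Option.getD_some, e3, pvFoldTake h j hj (j-k) k (by omega)]

theorem pvStepEq (hA hB : List Int) (j : Nat) (mij : Int)
    (hlenA : j < hA.length) (_hlenB : j < hB.length)
    (hAB : ∀ t : Nat, t ≤ j → hA.getD t 0 = hB.getD t 0)
    (a : Nat) (haj : a ≤ j)
    (ma : Int) (mn : Option Int) (cur : Int) (hcur : cur ≤ ma) :
    (pvInnerB mij hB j (pvSegMin hB j (a + 1), ma, mn) [(a : Int)]).1 = pvSegMin hB j a
    ∧ (pvInnerA mij hA j (ma, mn, cur) [(a : Int)]).1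
        = (pvInnerB mij hB j (pvSegMin hB j (a + 1), ma, mn) [(a : Int)]).2.1
    ∧ (pvInnerA mij hA j (ma, mn, cur) [(a : Int)]).2.1
        = (pvInnerB mij hB j (pvSegMin hB j (a + 1), ma, mn) [(a : Int)]).2.2
    ∧ (pvInnerA mij hA j (ma, mn, cur) [(a : Int)]).2.2
        ≤ (pvInnerA mij hA j (ma, mn, cur) [(a : Int)]).1 := by
  have hch : pvSliceMinA hA (a : Int) ((j : Int) + 1) = pvSegMin hB j a := by
    rw [pvSliceMinA_eq hA j a haj hlenA, pvSegMin_congr hA hB j hAB a]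
  have hhk : PySem.List.pyGetD hB (a : Int) 0 = hB.getD a 0 := by simp
  have hmin : (if hB.getD a 0 < pvSegMin hB j (a + 1) then hB.getD a 0 else pvSegMin hB j (a + 1))
      = pvSegMin hB j a := by
    rw [pvSegMin_succ hB j a haj]
    split <;> omega
  simp only [pvInnerA, pvInnerB, List.foldl_cons, List.foldl_nil, hch, hhk, hmin]
  set g := pvSegMin hB j a with hg
  set w : Int := (j : Int) - (a : Int) + 1 with hw
  by_cases hwg : w = g
  · simp only [hwg, ne_eq, not_true_eq_false, if_false, false_and]
    have : ¬ cur > ma := not_lt.mpr hcur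
    simp [this, hcur]
  · simp only [ne_eq, hwg, not_false_eq_true, if_true, true_and]
    by_cases hgt : w * g > ma
    · simp [hgt]
    · simp [hgt, not_lt.mp hgt]

theorem pvInnerA_cons (mij : Int) (hA : List Int) (j : Nat) (st : Int × Option Int × Int)
    (k : Int) (ks : List Int) :
    pvInnerA mij hA j st (k :: ks) = pvInnerA mij hA j (pvInnerA mij hA j st [k]) ks := by
  simp [pvInnerA]

theorem pvInnerB_cons (v : Int) (h : List Int) (j : Nat) (st : Int × Int × Option Int)
    (k : Int) (ks : List Int) :
    pvInnerB v h j st (k :: ks) = pvInnerB v h j (pvInnerB v h j st [k]) ks := by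
  simp [pvInnerB]

theorem pvInnerEq (hA hB : List Int) (j : Nat) (mij : Int)
    (hlenA : j < hA.length) (hlenB : j < hB.length)
    (hAB : ∀ t : Nat, t ≤ j → hA.getD t 0 = hB.getD t 0) :
    ∀ (d a lo : Nat), a = lo + d → a ≤ j →
    ∀ (ma : Int) (mn : Option Int) (cur : Int), cur ≤ ma →
    (pvInnerA mij hA j (ma, mn, cur) (PySem.List.pyRange (a : Int) ((lo : Int) - 1) (-1))).1
      = (pvInnerB mij hB j (pvSegMin hB j (a + 1), ma, mn) (PySem.List.pyRange (a : Int) ((lo : Int) - 1) (-1))).2.1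
    ∧ (pvInnerA mij hA j (ma, mn, cur) (PySem.List.pyRange (a : Int) ((lo : Int) - 1) (-1))).2.1
      = (pvInnerB mij hB j (pvSegMin hB j (a + 1), ma, mn) (PySem.List.pyRange (a : Int) ((lo : Int) - 1) (-1))).2.2
    ∧ (pvInnerA mij hA j (ma, mn, cur) (PySem.List.pyRange (a : Int) ((lo : Int) - 1) (-1))).2.2
      ≤ (pvInnerA mij hA j (ma, mn, cur) (PySem.List.pyRange (a : Int) ((lo : Int) - 1) (-1))).1 := by
  intro d
  induction d with
  | zero =>
    intro a lo hd haj ma mn cur hcur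
    have ha : (lo : Int) = (a : Int) := by omega
    rw [ha]
    have hrange : PySem.List.pyRange (a : Int) ((a : Int) - 1) (-1) = [(a : Int)] := by
      rw [PySem.List.pyRange_neg_one_cons (by omega), PySem.List.pyRange_neg_one_eq_nil le_rfl]
    rw [hrange]
    obtain ⟨s1, s2, s3, s4⟩ := pvStepEq hA hB j mij hlenA hlenB hAB a haj ma mn cur hcur
    exact ⟨s2, s3, s4⟩
  | succ d ih =>
    intro a lo hd haj ma mn cur hcur
    have hrange : PySem.List.pyRange (a : Int) ((lo : Int) - 1) (-1)
        = (a : Int) :: PySem.List.pyRange (((a - 1 : Nat) : Int)) ((lo : Int) - 1) (-1) := by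
      have e : (a : Int) - 1 = ((a - 1 : Nat) : Int) := by omega
      rw [PySem.List.pyRange_neg_one_cons (by omega), e]
    rw [hrange, pvInnerA_cons, pvInnerB_cons]
    obtain ⟨s1, s2, s3, s4⟩ := pvStepEq hA hB j mij hlenA hlenB hAB a haj ma mn cur hcur
    have hSB : pvInnerB mij hB j (pvSegMin hB j (a + 1), ma, mn) [(a : Int)]
        = (pvSegMin hB j ((a - 1) + 1),
           (pvInnerA mij hA j (ma, mn, cur) [(a : Int)]).1,
           (pvInnerA mij hA j (ma, mn, cur) [(a : Int)]).2.1) := by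
      have e : (a - 1) + 1 = a := by omega
      rw [e]
      exact Prod.ext s1 (Prod.ext s2.symm s3.symm)
    have hSA : pvInnerA mij hA j (ma, mn, cur) [(a : Int)]
        = ((pvInnerA mij hA j (ma, mn, cur) [(a : Int)]).1,
           (pvInnerA mij hA j (ma, mn, cur) [(a : Int)]).2.1,
           (pvInnerA mij hA j (ma, mn, cur) [(a : Int)]).2.2) := rfl
    rw [hSB, hSA]
    exact ih (a - 1) lo (by omega) (by omega) _ _ _ s4

theorem pvInnerEq' (hA hB : List Int) (j : Nat) (mij : Int)
    (hlenA : j < hA.length) (hlenB : j < hB.length)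
    (hAB : ∀ t : Nat, t ≤ j → hA.getD t 0 = hB.getD t 0)
    (a lo : Nat) (hlo : lo ≤ a) (haj : a ≤ j)
    (ma : Int) (mn : Option Int) (cur : Int) (hcur : cur ≤ ma)
    (m : Int) (hm : m = pvSegMin hB j (a + 1)) :
    (pvInnerA mij hA j (ma, mn, cur) (PySem.List.pyRange (a : Int) ((lo : Int) - 1) (-1))).1
      = (pvInnerB mij hB j (m, ma, mn) (PySem.List.pyRange (a : Int) ((lo : Int) - 1) (-1))).2.1
    ∧ (pvInnerA mij hA j (ma, mn, cur) (PySem.List.pyRange (a : Int) ((lo : Int) - 1) (-1))).2.1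
      = (pvInnerB mij hB j (m, ma, mn) (PySem.List.pyRange (a : Int) ((lo : Int) - 1) (-1))).2.2
    ∧ (pvInnerA mij hA j (ma, mn, cur) (PySem.List.pyRange (a : Int) ((lo : Int) - 1) (-1))).2.2
      ≤ (pvInnerA mij hA j (ma, mn, cur) (PySem.List.pyRange (a : Int) ((lo : Int) - 1) (-1))).1 := by
  subst hm
  exact pvInnerEq hA hB j mij hlenA hlenB hAB (a - lo) a lo (by omega) haj ma mn cur hcur

theorem pvGetDSetSelf {α : Type} (l : List α) (i : Nat) (x d : α) (h : i < l.length) :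
    (l.set i x).getD i d = x := by
  rw [List.getD_eq_getElem _ _ (by simpa using h)]; simp

theorem pvGetDSetNe {α : Type} (l : List α) (i t : Nat) (x d : α) (h : t ≠ i) :
    (l.set i x).getD t d = l.getD t d := by
  simp [List.getD_eq_getElem?_getD, List.getElem?_set_ne (by omega : i ≠ t)]

theorem pvCellA_neg (matrix : List (List Int)) (i j : Nat)
    (st : List (List Int) × List (List Int) × Int × Option Int × Int)
    (hm : (matrix.getD i []).getD j 0 = -9) : pvCellA matrix i j st = st := by
  simp only [pvCellA]
  rw [if_pos hm]

theorem pvCellB_neg (matrix : List (List Int)) (i : Nat) (row : List Int) (j : Nat)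
    (st : List Int × List Int × Int × Option Int) (hm : row.getD j 0 = -9) :
    pvCellB matrix i row j st = (st.1.set j 0, st.2.1, st.2.2.1, st.2.2.2) := by
  simp only [pvCellB]
  rw [if_pos hm]

structure PvInv (matrix : List (List Int)) (rows cols i : Nat) (H0 L0 : List (List Int))
    (h0 : List Int) (j : Nat)
    (stA : List (List Int) × List (List Int) × Int × Option Int × Int)
    (stB : List Int × List Int × Int × Option Int) : Prop where
  lenH : stA.1.length = rows
  lenL : stA.2.1.length = rows
  rowlen : (stA.1.getD i []).length = cols
  pref : ∀ t : Nat, t < j → (stA.1.getD i []).getD t 0 = stB.1.getD t 0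
  zero : ∀ t : Nat, j ≤ t → (stA.1.getD i []).getD t 0 = 0
  hother : ∀ i' : Nat, i' ≠ i → stA.1.getD i' [] = H0.getD i' []
  lrow : stA.2.1.getD i [] = stB.2.1
  lother : ∀ i' : Nat, i' ≠ i → stA.2.1.getD i' [] = L0.getD i' []
  hlen : stB.1.length = cols
  llen : stB.2.1.length = cols
  lbound : ∀ t : Nat, 0 ≤ stB.2.1.getD t 0 ∧ stB.2.1.getD t 0 ≤ (t : Int)
  suf : ∀ t : Nat, j ≤ t → stB.1.getD t 0 = h0.getD t 0
  ema : stA.2.2.1 = stB.2.2.1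
  emn : stA.2.2.2.1 = stB.2.2.2
  ecur : stA.2.2.2.2 ≤ stA.2.2.1

theorem pvCellStep (matrix : List (List Int)) (rows cols i : Nat) (H0 L0 : List (List Int))
    (h0 : List Int) (j : Nat)
    (stA : List (List Int) × List (List Int) × Int × Option Int × Int)
    (stB : List Int × List Int × Int × Option Int)
    (inv : PvInv matrix rows cols i H0 L0 h0 j stA stB)
    (hi : i < rows) (hj : j < cols)
    (hprev : 0 < i → H0.getD (i - 1) [] = h0) :
    PvInv matrix rows cols i H0 L0 h0 (j + 1)
      (pvCellA matrix i j stA) (pvCellB matrix i (matrix.getD i []) j stB) := by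
  obtain ⟨lenH, lenL, rowlen, pref, zero, hother, lrow, lother, hlen, llen, lbound, suf, ema, emn, ecur⟩ := inv
  by_cases hm : (matrix.getD i []).getD j 0 = -9
  · rw [pvCellA_neg matrix i j stA hm, pvCellB_neg matrix i (matrix.getD i []) j stB hm]
    refine ⟨lenH, lenL, rowlen, ?_, ?_, hother, lrow, lother, by simp [hlen], llen, lbound, ?_, ema, emn, ecur⟩
    · intro t ht
      rcases Nat.lt_or_ge t j with h | h
      · rw [pvGetDSetNe _ _ _ _ _ (by omega), pref t h]
      · have ht' : t = j := by omega
        subst ht'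
        rw [pvGetDSetSelf _ _ _ _ (by omega), zero t le_rfl]
    · intro t ht
      exact zero t (by omega)
    · intro t ht
      rw [pvGetDSetNe _ _ _ _ _ (by omega), suf t (by omega)]
  · simp only [pvCellA, pvCellB]
    rw [if_neg hm, if_neg hm, lrow]
    have hjB : j < stB.1.length := by omega
    have hjA : j < (stA.1.getD i []).length := by omega
    have hiA : i < stA.1.length := by omega
    have hiL : i < stA.2.1.length := by omega
    have hval : (if i = 0 then (1:Int)
          else if (matrix.getD i []).getD j 0 = (matrix.getD (i - 1) []).getD j 0
            then (stA.1.getD (i - 1) []).getD j 0 + 1 else 1)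
        = (if 0 < i ∧ (matrix.getD i []).getD j 0 = (matrix.getD (i - 1) []).getD j 0
            then stB.1.getD j 0 + 1 else 1) := by
      rcases Nat.eq_zero_or_pos i with h0 | h0
      · subst h0
        simp
      · have hne : i ≠ 0 := by omega
        rw [if_neg hne]
        by_cases hc : (matrix.getD i []).getD j 0 = (matrix.getD (i - 1) []).getD j 0
        · rw [if_pos hc, if_pos ⟨h0, hc⟩, hother (i - 1) (by omega), hprev h0, ← suf j le_rfl]
        · rw [if_neg hc, if_neg (by tauto)]
    rw [hval]
    set w := (if 0 < i ∧ (matrix.getD i []).getD j 0 = (matrix.getD (i - 1) []).getD j 0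
            then stB.1.getD j 0 + 1 else 1) with hw
    set lij := (if j = 0 ∨ ¬(matrix.getD i []).getD j 0 = (matrix.getD i []).getD (j - 1) 0
            then (j : Int) else stB.2.1.getD (j - 1) 0) with hlij
    have hlij0 : 0 ≤ lij := by
      rw [hlij]; split
      · positivity
      · exact (lbound (j - 1)).1
    have hlijle : lij ≤ (j : Int) := by
      rw [hlij]; split
      · exact le_rfl
      · calc stB.2.1.getD (j - 1) 0 ≤ ((j - 1 : Nat) : Int) := (lbound (j - 1)).2
          _ ≤ (j : Int) := by omega
    have hcast : ((lij.toNat : Nat) : Int) = lij := Int.toNat_of_nonneg hlij0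
    rw [← hcast, ← ema, ← emn]
    have hAB : ∀ t : Nat, t ≤ j →
        ((stA.1.getD i []).set j w).getD t 0 = (stB.1.set j w).getD t 0 := by
      intro t ht
      rcases Nat.lt_or_ge t j with h | h
      · rw [pvGetDSetNe _ _ _ _ _ (by omega), pvGetDSetNe _ _ _ _ _ (by omega), pref t h]
      · have : t = j := by omega
        subst this
        rw [pvGetDSetSelf _ _ _ _ hjA, pvGetDSetSelf _ _ _ _ hjB]
    obtain ⟨c1, c2, c3⟩ := pvInnerEq' ((stA.1.getD i []).set j w) (stB.1.set j w) j
      ((matrix.getD i []).getD j 0) (by simpa using hjA) (by simpa using hjB) hAB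
      j lij.toNat (by omega) le_rfl stA.2.2.1 stA.2.2.2.1 stA.2.2.2.2 ecur
      ((stB.1.set j w).getD j 0)
      (by rw [pvSegMin_ge _ _ _ (Nat.le_succ j)])
    refine ⟨by simp [lenH], by simp [lenL], ?_, ?_, ?_, ?_, ?_, ?_, by simp [hlen], by simp [llen], ?_, ?_, c1, c2, c3⟩
    · rw [pvGetDSetSelf _ _ _ _ hiA]
      simpa using rowlen
    · intro t ht
      rw [pvGetDSetSelf _ _ _ _ hiA]
      exact hAB t (by omega)
    · intro t ht
      rw [pvGetDSetSelf _ _ _ _ hiA, pvGetDSetNe _ _ _ _ _ (by omega)]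
      exact zero t (by omega)
    · intro i' hi'
      rw [pvGetDSetNe _ _ _ _ _ hi']
      exact hother i' hi'
    · rw [pvGetDSetSelf _ _ _ _ hiL]
    · intro i' hi'
      rw [pvGetDSetNe _ _ _ _ _ hi']
      exact lother i' hi'
    · intro t
      rcases eq_or_ne t j with h | h
      · subst h
        rw [pvGetDSetSelf _ _ _ _ (by omega), hcast]
        exact ⟨hlij0, hlijle⟩
      · rw [pvGetDSetNe _ _ _ _ _ h]
        exact lbound t
    · intro t ht
      rw [pvGetDSetNe _ _ _ _ _ (by omega)]
      exact suf t (by omega)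

theorem pvGetDReplicate (n t : Nat) : (List.replicate n (0:Int)).getD t 0 = 0 := by
  simp [List.getD_eq_getElem?_getD, List.getElem?_replicate]
  split <;> rfl

theorem pvRowFold (matrix : List (List Int)) (rows cols i : Nat)
    (H0 L0 : List (List Int)) (h0 : List Int)
    (hi : i < rows) (hprev : 0 < i → H0.getD (i - 1) [] = h0) :
    ∀ (j : Nat), j ≤ cols →
    ∀ stA stB, PvInv matrix rows cols i H0 L0 h0 0 stA stB →
    PvInv matrix rows cols i H0 L0 h0 j
      ((List.range j).foldl (fun st j' => pvCellA matrix i j' st) stA)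
      ((List.range j).foldl (fun st j' => pvCellB matrix i (matrix.getD i []) j' st) stB) := by
  intro j
  induction j with
  | zero => intro _ stA stB inv; simpa using inv
  | succ j ih =>
    intro hjc stA stB inv
    rw [List.range_succ, List.foldl_append, List.foldl_append]
    simp only [List.foldl_cons, List.foldl_nil]
    exact pvCellStep matrix rows cols i H0 L0 h0 j _ _ (ih (by omega) stA stB inv) hi (by omega) hprev

structure PvMInv (matrix : List (List Int)) (rows cols i : Nat)
    (stA : List (List Int) × List (List Int) × Int × Option Int × Int)
    (stB : List Int × Int × Option Int) : Prop where
  lenH : stA.1.length = rows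
  lenL : stA.2.1.length = rows
  hzrows : ∀ i' : Nat, i ≤ i' → i' < rows → stA.1.getD i' [] = List.replicate cols 0
  lzrows : ∀ i' : Nat, i ≤ i' → i' < rows → stA.2.1.getD i' [] = List.replicate cols 0
  hprev : 0 < i → stA.1.getD (i - 1) [] = stB.1
  hlen : stB.1.length = cols
  ema : stA.2.2.1 = stB.2.1
  emn : stA.2.2.2.1 = stB.2.2
  ecur : stA.2.2.2.2 ≤ stA.2.2.1

theorem pvRowStep (matrix : List (List Int)) (rows cols i : Nat)
    (stA : List (List Int) × List (List Int) × Int × Option Int × Int)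
    (stB : List Int × Int × Option Int)
    (hi : i < rows) (minv : PvMInv matrix rows cols i stA stB) :
    PvMInv matrix rows cols (i + 1)
      ((List.range cols).foldl (fun st j' => pvCellA matrix i j' st) stA)
      (((List.range cols).foldl (fun st j' => pvCellB matrix i (matrix.getD i []) j' st)
          (stB.1, List.replicate cols 0, stB.2.1, stB.2.2)).1,
       ((List.range cols).foldl (fun st j' => pvCellB matrix i (matrix.getD i []) j' st)
          (stB.1, List.replicate cols 0, stB.2.1, stB.2.2)).2.2.1,
       ((List.range cols).foldl (fun st j' => pvCellB matrix i (matrix.getD i []) j' st)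
          (stB.1, List.replicate cols 0, stB.2.1, stB.2.2)).2.2.2) := by
  obtain ⟨lenH, lenL, hzrows, lzrows, hprev, hlen, ema, emn, ecur⟩ := minv
  have inv0 : PvInv matrix rows cols i stA.1 stA.2.1 stB.1 0 stA
      (stB.1, List.replicate cols 0, stB.2.1, stB.2.2) := by
    refine ⟨lenH, lenL, ?_, ?_, ?_, fun _ _ => rfl, ?_, fun _ _ => rfl, hlen, ?_, ?_, fun _ _ => rfl, ema, emn, ecur⟩
    · rw [hzrows i le_rfl hi]; simp
    · intro t ht; omega
    · intro t _; rw [hzrows i le_rfl hi, pvGetDReplicate]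
    · rw [lzrows i le_rfl hi]
    · simp
    · intro t; rw [pvGetDReplicate]; exact ⟨le_rfl, Int.natCast_nonneg t⟩
  have inv' := pvRowFold matrix rows cols i stA.1 stA.2.1 stB.1 hi hprev cols le_rfl stA
    (stB.1, List.replicate cols 0, stB.2.1, stB.2.2) inv0
  refine ⟨inv'.lenH, inv'.lenL, ?_, ?_, ?_, inv'.hlen, inv'.ema, inv'.emn, inv'.ecur⟩
  · intro i' h1 h2
    rw [inv'.hother i' (by omega), hzrows i' (by omega) h2]
  · intro i' h1 h2
    rw [inv'.lother i' (by omega), lzrows i' (by omega) h2]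
  · intro _
    simp only [Nat.add_sub_cancel]
    apply List.ext_getElem (by rw [inv'.rowlen, inv'.hlen])
    intro t h1 h2
    have hrl := inv'.rowlen
    have := inv'.pref t (by omega)
    rwa [List.getD_eq_getElem _ _ h1, List.getD_eq_getElem _ _ h2] at this

theorem pvMainFold (matrix : List (List Int)) (rows cols : Nat) :
    ∀ (n : Nat), n ≤ rows → ∀ stA stB, PvMInv matrix rows cols 0 stA stB →
    PvMInv matrix rows cols n
      ((List.range n).foldl (fun st i =>
          (List.range cols).foldl (fun st j => pvCellA matrix i j st) st) stA)
      ((List.range n).foldl (fun (st : List Int × Int × Option Int) i =>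
          let row := matrix.getD i []
          let r := (List.range cols).foldl (fun st j => pvCellB matrix i row j st)
            (st.1, List.replicate cols 0, st.2.1, st.2.2)
          (r.1, r.2.2.1, r.2.2.2)) stB) := by
  intro n
  induction n with
  | zero =>
    intro _ stA stB minv
    simpa using minv
  | succ n ih =>
    intro hn stA stB minv
    rw [List.range_succ, List.foldl_append, List.foldl_append]
    simp only [List.foldl_cons, List.foldl_nil]
    exact pvRowStep matrix rows cols n _ _ (by omega) (ih (by omega) stA stB minv)

theorem pvTopEq (matrix : List (List Int)) : find_largest_rectange matrix = find_largest_rectange_alt matrix := by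
  by_cases hempty : matrix = [] ∨ matrix.headD [] = []
  · rw [find_largest_rectange, find_largest_rectange_alt, if_pos hempty, if_pos hempty]
  · rw [find_largest_rectange, find_largest_rectange_alt, if_neg hempty, if_neg hempty]
    dsimp only []
    have minv0 : PvMInv matrix matrix.length (matrix.headD []).length 0
        (List.replicate matrix.length (List.replicate (matrix.headD []).length (0 : Int)),
         List.replicate matrix.length (List.replicate (matrix.headD []).length (0 : Int)),
         (0 : Int), (none : Option Int), (0 : Int))
        (List.replicate (matrix.headD []).length (0 : Int), (0 : Int), (none : Option Int)) := by
      refine ⟨by simp, by simp, ?_, ?_, by omega, by simp, rfl, rfl, le_rfl⟩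
      · intro i' _ h2
        rw [List.getD_eq_getElem _ _ (by simpa using h2)]
        simp
      · intro i' _ h2
        rw [List.getD_eq_getElem _ _ (by simpa using h2)]
        simp
    have minv := pvMainFold matrix matrix.length (matrix.headD []).length matrix.length le_rfl
      _ _ minv0
    rw [minv.ema, minv.emn]


-- ===== VERDICT (by name: the statement is the Claim_ definition above) =====
theorem find_largest_rectange_spec : Claim_equal_find_largest_rectange := by
  intro matrix _ _
  unfold Spec_find_largest_rectange
  exact pvTopEq matrix
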